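-- pv_equiv track=rewrite | github.com/pysselmedheg/micropython_libs | armv6m_asm/armv6m_asm.py | regset
-- ===== SOURCE A (Python) =====
-- def regset(regs, ref):
--     if type(regs) != set:
--         return None
--     v = 0
--     for r in regs:
--         if r not in ref:
--             return None
--         v |= 1 << ref.index(r)
--     return v
-- ===== SOURCE B (Python) =====
-- def regset(regs, ref):
--     # One pass over ref probing the set regs, with a seen-set for first occurrences.
--     if type(regs) != set:
--         return None
--     v = 0
--     seen = set()
--     for i, item in enumerate(ref):
--         if item in regs and item not in seen:
--             v |= 1 << i
--             seen.add(item)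
--     if len(seen) != len(regs):
--         return None
--     return v
-- ===== Notes on version B (the rewrite author's own statement) =====
-- stated objective: alternative
-- what changed: B makes a single pass over enumerate(ref) probing the set regs and a seen-set for first occurrences, instead of A's per-register 'in ref' scan plus ref.index scan; a final size check of seen against regs replaces A's early None returns.
import Mathlib
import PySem

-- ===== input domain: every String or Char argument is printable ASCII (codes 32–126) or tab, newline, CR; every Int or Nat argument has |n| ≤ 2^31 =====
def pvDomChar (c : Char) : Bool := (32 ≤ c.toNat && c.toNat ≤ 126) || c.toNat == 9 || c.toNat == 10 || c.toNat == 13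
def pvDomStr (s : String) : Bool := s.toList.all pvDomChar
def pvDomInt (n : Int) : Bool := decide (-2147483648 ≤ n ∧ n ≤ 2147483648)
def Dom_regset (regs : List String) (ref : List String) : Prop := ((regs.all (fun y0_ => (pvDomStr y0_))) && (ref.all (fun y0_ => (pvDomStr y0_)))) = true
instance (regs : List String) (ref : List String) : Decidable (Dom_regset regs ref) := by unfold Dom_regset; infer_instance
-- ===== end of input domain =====

-- B replaces A's per-register scans of ref (`in` + `.index`) by one pass over enumerate(ref)
-- with a seen-set for first occurrences (alternative decomposition; not claimed faster).
-- `regs` is a Python set: under the type convention it arrives as the List of its distinct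
-- elements; the `type(regs) != set` guard (present in both Pythons) is therefore always
-- passed and has no Lean counterpart.

-- ===== PORT A =====
-- for r in regs: if r not in ref: return None; v |= 1 << ref.index(r)
-- (`ref.index(r)` is the first index of r; it is `List.idxOf` here, guarded by `r ∈ ref`,
--  which is exactly where Python's .index succeeds)
def regsetGoA (ref : List String) : List String → Int → Option Int
  | [], v => some v
  | r :: rs, v =>
    if r ∈ ref then
      regsetGoA ref rs (PySem.Int.bor v ((1 : Int) <<< ref.idxOf r))
    else none

def regset (regs : List String) (ref : List String) : Option Int :=
  regsetGoA ref regs 0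

-- ===== PORT B =====
-- loop body: if item in regs and item not in seen: v |= 1 << i; seen.add(item)
def regsetStepB (regs : List String) (st : Int × PySem.Set String) (p : Int × String) :
    Int × PySem.Set String :=
  if p.2 ∈ regs ∧ p.2 ∉ st.2 then
    (PySem.Int.bor st.1 ((1 : Int) <<< p.1.toNat), PySem.Set.add st.2 p.2)
  else st

def regset_alt (regs : List String) (ref : List String) : Option Int :=
  let st := (PySem.List.enumerate ref).foldl (regsetStepB regs)
      ((0 : Int), (PySem.Set.empty : PySem.Set String))
  -- len(regs): regs is the set decoded from the argument list (identity on distinct-element lists)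
  if PySem.Set.len st.2 ≠ PySem.Set.len (PySem.Set.ofList regs) then none else some st.1

-- ===== PRECONDITION & SPEC =====
def Spec_regset (regs : List String) (ref : List String) (out : Option Int) : Prop := out = regset_alt regs ref
instance (regs : List String) (ref : List String) (out : Option Int) : Decidable (Spec_regset regs ref out) := by unfold Spec_regset; infer_instance

-- ===== CLAIM (what is proved, stated in full; the proofs are below) =====
def Claim_equal_regset : Prop := ∀ (regs : List String) (ref : List String), Dom_regset regs ref → Spec_regset regs ref (regset regs ref)

-- ===== LEMMAS AND PROOFS =====

-- the OR of the first-index bits of the members of rs (Nat side; all values are nonnegative)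
def orBits (ref : List String) (rs : List String) : Nat :=
  rs.foldr (fun r acc => (1 <<< ref.idxOf r) ||| acc) 0

-- the elements of suf that are in regs and not in pre, first occurrences only, in order
def newRegs (regs : List String) : List String → List String → List String
  | _, [] => []
  | pre, x :: rest =>
    if x ∈ regs ∧ x ∉ pre then x :: newRegs regs (pre ++ [x]) rest
    else newRegs regs (pre ++ [x]) rest

-- the value B's loop adds while scanning suf after having scanned pre
def newVal (regs : List String) : List String → List String → Nat
  | _, [] => 0
  | pre, x :: rest =>
    if x ∈ regs ∧ x ∉ pre then (1 <<< pre.length) ||| newVal regs (pre ++ [x]) rest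
    else newVal regs (pre ++ [x]) rest

theorem regsetGoA_none (ref : List String) :
    ∀ (rs : List String) (v : Int), (∃ r ∈ rs, r ∉ ref) → regsetGoA ref rs v = none := by
  intro rs
  induction rs with
  | nil => intro v h; rcases h with ⟨r, hr, _⟩; cases hr
  | cons x t ih =>
    intro v h
    by_cases hx : x ∈ ref
    · rcases h with ⟨r, hr, hnr⟩
      rcases List.mem_cons.mp hr with h1 | h1
      · subst h1; exact absurd hx hnr
      · simp only [regsetGoA, if_pos hx]
        exact ih _ ⟨r, h1, hnr⟩
    · simp [regsetGoA, hx]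

theorem shl_cast (k : Nat) : ((1 <<< k : Nat) : Int) = (1 : Int) <<< k := rfl

theorem regsetGoA_some (ref : List String) :
    ∀ (rs : List String) (v : Nat), (∀ r ∈ rs, r ∈ ref) →
      regsetGoA ref rs (v : Int) = some ((v ||| orBits ref rs : Nat) : Int) := by
  intro rs
  induction rs with
  | nil => intro v _; simp [regsetGoA, orBits]
  | cons x t ih =>
    intro v h
    have hx : x ∈ ref := h x (List.mem_cons_self ..)
    have ht : ∀ r ∈ t, r ∈ ref := fun r hr => h r (List.mem_cons_of_mem _ hr)
    simp only [regsetGoA, if_pos hx]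
    rw [← shl_cast, PySem.Int.bor_natCast, ih _ ht]
    simp only [orBits, List.foldr_cons]
    rw [Nat.or_assoc]

-- B's loop invariant: scanning suf with seen = set of elements of pre that are in regs
theorem foldl_stepB (regs : List String) :
    ∀ (suf pre : List String) (v : Nat),
      (PySem.List.enumerate suf (pre.length : Int)).foldl (regsetStepB regs)
          ((v : Int), PySem.Set.ofList (pre.filter (fun x => decide (x ∈ regs))))
        = (((v ||| newVal regs pre suf : Nat) : Int),
           PySem.Set.ofList ((pre ++ suf).filter (fun x => decide (x ∈ regs)))) := by
  intro suf
  induction suf with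
  | nil => intro pre v; simp [PySem.List.enumerate, newVal]
  | cons x rest ih =>
    intro pre v
    rw [PySem.List.enumerate_cons, List.foldl_cons]
    have hseen : x ∈ PySem.Set.ofList (pre.filter (fun x => decide (x ∈ regs))) ↔
        (x ∈ pre ∧ x ∈ regs) := by
      rw [PySem.Set.mem_ofList, List.mem_filter]
      simp
    have hofl : ∀ (l : List String) (y : String),
        PySem.Set.ofList (l ++ [y]) = PySem.Set.add (PySem.Set.ofList l) y := by
      intro l y
      rw [PySem.Set.ofList_eq_foldl, PySem.Set.ofList_eq_foldl, List.foldl_append]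
      rfl
    have hlen : ((pre ++ [x]).length : Int) = (pre.length : Int) + 1 := by
      simp
    by_cases hc : x ∈ regs ∧ x ∉ pre
    · have hcond : x ∈ regs ∧ x ∉ PySem.Set.ofList (pre.filter (fun x => decide (x ∈ regs))) := by
        refine ⟨hc.1, ?_⟩
        rw [hseen]; exact fun h => hc.2 h.1
      simp only [regsetStepB, if_pos hcond]
      rw [← shl_cast]
      simp only [Int.toNat_natCast]
      rw [PySem.Int.bor_natCast]
      have hfx : (pre ++ [x]).filter (fun x => decide (x ∈ regs))
          = pre.filter (fun x => decide (x ∈ regs)) ++ [x] := by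
        rw [List.filter_append]
        simp [hc.1]
      have := ih (pre ++ [x]) (v ||| 1 <<< pre.length)
      rw [hlen, hfx, hofl] at this
      rw [this]
      have hV : newVal regs pre (x :: rest) = (1 <<< pre.length) ||| newVal regs (pre ++ [x]) rest := by
        simp [newVal, hc]
      rw [hV, ← Nat.or_assoc]
      simp
    · have hcond : ¬ (x ∈ regs ∧ x ∉ PySem.Set.ofList (pre.filter (fun x => decide (x ∈ regs)))) := by
        intro h
        exact hc ⟨h.1, fun hp => h.2 (hseen.mpr ⟨hp, h.1⟩)⟩
      simp only [regsetStepB, if_neg hcond]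
      have hfo : PySem.Set.ofList ((pre ++ [x]).filter (fun x => decide (x ∈ regs)))
          = PySem.Set.ofList (pre.filter (fun x => decide (x ∈ regs))) := by
        rw [List.filter_append]
        by_cases hxr : x ∈ regs
        · have hxp : x ∈ pre := by
            by_contra hnp; exact hc ⟨hxr, hnp⟩
          have : (([x] : List String).filter (fun x => decide (x ∈ regs))) = [x] := by simp [hxr]
          rw [this, hofl]
          exact PySem.Set.add_of_mem (hseen.mpr ⟨hxp, hxr⟩)
        · have : (([x] : List String).filter (fun x => decide (x ∈ regs))) = [] := by simp [hxr]
          rw [this, List.append_nil]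
      have := ih (pre ++ [x]) v
      rw [hlen, hfo] at this
      rw [this]
      have hV : newVal regs pre (x :: rest) = newVal regs (pre ++ [x]) rest := by
        simp [newVal, hc]
      rw [hV]
      simp

theorem newVal_eq_orBits (regs : List String) :
    ∀ (suf pre : List String), newVal regs pre suf = orBits (pre ++ suf) (newRegs regs pre suf) := by
  intro suf
  induction suf with
  | nil => intro pre; simp [newVal, newRegs, orBits]
  | cons x rest ih =>
    intro pre
    by_cases hc : x ∈ regs ∧ x ∉ pre
    · have hcat : pre ++ x :: rest = (pre ++ [x]) ++ rest := by simp
      simp only [newVal, newRegs, if_pos hc]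
      rw [ih (pre ++ [x])]
      simp only [orBits, List.foldr_cons]
      have hidx : (pre ++ x :: rest).idxOf x = pre.length := by
        rw [List.idxOf_append_of_notMem hc.2]
        simp
      rw [hcat, ← hidx, hcat]
    · have hcat : pre ++ x :: rest = (pre ++ [x]) ++ rest := by simp
      simp only [newVal, newRegs, if_neg hc]
      rw [ih (pre ++ [x]), hcat]

theorem mem_newRegs (regs : List String) :
    ∀ (suf pre : List String) (y : String),
      y ∈ newRegs regs pre suf ↔ y ∈ suf ∧ y ∈ regs ∧ y ∉ pre := by
  intro suf
  induction suf with
  | nil => intro pre y; simp [newRegs]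
  | cons x rest ih =>
    intro pre y
    by_cases hc : x ∈ regs ∧ x ∉ pre
    · simp only [newRegs, if_pos hc, List.mem_cons, ih]
      constructor
      · rintro (rfl | ⟨h1, h2, h3⟩)
        · exact ⟨Or.inl rfl, hc.1, hc.2⟩
        · exact ⟨Or.inr h1, h2, fun hp => h3 (List.mem_append_left _ hp)⟩
      · rintro ⟨h1, h2, h3⟩
        rcases h1 with rfl | h1
        · exact Or.inl rfl
        · by_cases hyx : y = x
          · exact Or.inl hyx
          · refine Or.inr ⟨h1, h2, ?_⟩
            intro hp
            rcases List.mem_append.mp hp with hp | hp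
            · exact h3 hp
            · exact hyx (List.mem_singleton.mp hp)
    · simp only [newRegs, if_neg hc, ih, List.mem_cons]
      constructor
      · rintro ⟨h1, h2, h3⟩
        exact ⟨Or.inr h1, h2, fun hp => h3 (List.mem_append_left _ hp)⟩
      · rintro ⟨h1, h2, h3⟩
        rcases h1 with rfl | h1
        · exact absurd ⟨h2, h3⟩ hc
        · by_cases hyx : y = x
          · subst hyx; exact absurd ⟨h2, h3⟩ hc
          · refine ⟨h1, h2, ?_⟩
            intro hp
            rcases List.mem_append.mp hp with hp | hp
            · exact h3 hp
            · exact hyx (List.mem_singleton.mp hp)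

theorem nodup_newRegs (regs : List String) :
    ∀ (suf pre : List String), (newRegs regs pre suf).Nodup := by
  intro suf
  induction suf with
  | nil => intro pre; simp [newRegs]
  | cons x rest ih =>
    intro pre
    by_cases hc : x ∈ regs ∧ x ∉ pre
    · simp only [newRegs, if_pos hc]
      refine List.nodup_cons.mpr ⟨?_, ih (pre ++ [x])⟩
      intro hx
      have := (mem_newRegs regs rest (pre ++ [x]) x).mp hx
      exact this.2.2 (List.mem_append_right _ (List.mem_singleton.mpr rfl))
    · simp only [newRegs, if_neg hc]
      exact ih (pre ++ [x])

theorem orBits_perm (ref : List String) {l1 l2 : List String} (h : l1.Perm l2) :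
    orBits ref l1 = orBits ref l2 := by
  have lcomm : LeftCommutative (fun (r : String) (acc : Nat) => (1 <<< ref.idxOf r) ||| acc) :=
    ⟨fun a b c => by
      rw [← Nat.or_assoc, Nat.or_comm (1 <<< ref.idxOf a), Nat.or_assoc]⟩
  exact h.foldr_eq 0

theorem orBits_absorb (ref : List String) {x : String} :
    ∀ {l : List String}, x ∈ l → (1 <<< ref.idxOf x) ||| orBits ref l = orBits ref l := by
  intro l
  induction l with
  | nil => intro h; cases h
  | cons y t ih =>
    intro h
    rcases List.mem_cons.mp h with rfl | h
    · simp only [orBits, List.foldr_cons]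
      rw [← Nat.or_assoc, Nat.or_self]
    · simp only [orBits, List.foldr_cons]
      rw [← Nat.or_assoc, Nat.or_comm (1 <<< ref.idxOf x), Nat.or_assoc]
      have := ih h
      simp only [orBits] at this
      rw [this]

theorem orBits_dedup (ref : List String) :
    ∀ (l : List String), orBits ref l = orBits ref l.dedup := by
  intro l
  induction l with
  | nil => rfl
  | cons x t ih =>
    by_cases hx : x ∈ t
    · rw [List.dedup_cons_of_mem hx, ← ih]
      simp only [orBits, List.foldr_cons]
      exact orBits_absorb ref hx
    · rw [List.dedup_cons_of_notMem hx]
      simp only [orBits, List.foldr_cons]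
      have := ih
      simp only [orBits] at this
      rw [this]

-- equal membership + Nodup on both sides gives a permutation
theorem perm_of_nodup_mem {l1 l2 : List String} (h1 : l1.Nodup) (h2 : l2.Nodup)
    (h : ∀ y, y ∈ l1 ↔ y ∈ l2) : l1.Perm l2 := by
  apply List.perm_of_nodup_nodup_toFinset_eq h1 h2
  ext y
  simp only [List.mem_toFinset]
  exact h y

theorem regset_eq (regs ref : List String) : regset regs ref = regset_alt regs ref := by
  have hfold := foldl_stepB regs ref [] 0
  simp only [List.nil_append, List.length_nil, List.filter_nil] at hfold
  have hB : regset_alt regs ref =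
      (if PySem.Set.len (PySem.Set.ofList (ref.filter (fun x => decide (x ∈ regs))))
            ≠ PySem.Set.len (PySem.Set.ofList regs) then none
       else some ((newVal regs [] ref : Nat) : Int)) := by
    unfold regset_alt
    rw [show (PySem.Set.empty : PySem.Set String) = PySem.Set.ofList [] from rfl]
    rw [show ((0 : Int)) = ((0 : Nat) : Int) from rfl]
    rw [hfold]
    simp [Nat.zero_or]
  by_cases hall : ∀ r ∈ regs, r ∈ ref
  · -- both return the OR of the first-index bits of the registers
    have hA : regset regs ref = some ((orBits ref regs : Nat) : Int) := by
      unfold regset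
      rw [show ((0 : Int)) = ((0 : Nat) : Int) from rfl, regsetGoA_some ref regs 0 hall]
      simp
    have hmem : ∀ y, y ∈ PySem.Set.ofList (ref.filter (fun x => decide (x ∈ regs)))
        ↔ y ∈ PySem.Set.ofList regs := by
      intro y
      rw [PySem.Set.mem_ofList, PySem.Set.mem_ofList, List.mem_filter]
      simp only [decide_eq_true_eq]
      exact ⟨fun h => h.2, fun h => ⟨hall y h, h⟩⟩
    have hperm := perm_of_nodup_mem (PySem.Set.nodup_ofList _) (PySem.Set.nodup_ofList _) hmem
    rw [hA, hB, if_neg (by simp [PySem.Set.len, hperm.length_eq])]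
    -- value equality
    have hVperm : (newRegs regs [] ref).Perm regs.dedup := by
      apply perm_of_nodup_mem (nodup_newRegs regs ref []) (List.nodup_dedup regs)
      intro y
      rw [mem_newRegs, List.mem_dedup]
      exact ⟨fun h => h.2.1, fun h => ⟨hall y h, h, List.not_mem_nil⟩⟩
    have hval : newVal regs [] ref = orBits ref regs := by
      rw [newVal_eq_orBits regs ref [], List.nil_append]
      rw [orBits_perm ref hVperm, ← orBits_dedup]
    rw [hval]
  · -- some register is missing from ref: both return none
    rw [not_forall] at hall
    rcases hall with ⟨r, hr2⟩
    rw [Classical.not_imp] at hr2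
    obtain ⟨hr, hnr⟩ := hr2
    have hA : regset regs ref = none := regsetGoA_none ref regs 0 ⟨r, hr, hnr⟩
    have hlt : (PySem.Set.ofList (ref.filter (fun x => decide (x ∈ regs)))).length
        < (PySem.Set.ofList regs).length := by
      rw [← List.toFinset_card_of_nodup (PySem.Set.nodup_ofList _),
          ← List.toFinset_card_of_nodup (PySem.Set.nodup_ofList regs)]
      apply Finset.card_lt_card
      constructor
      · intro y hy
        simp only [List.mem_toFinset, PySem.Set.mem_ofList, List.mem_filter] at hy ⊢
        simpa using hy.2
      · intro hsub
        have hrin : r ∈ (PySem.Set.ofList regs).toFinset := by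
          simp [PySem.Set.mem_ofList, hr]
        have := hsub hrin
        simp only [List.mem_toFinset, PySem.Set.mem_ofList, List.mem_filter] at this
        exact hnr this.1
    rw [hA, hB, if_pos]
    unfold PySem.Set.len
    intro hcontra
    have := Int.natCast_inj.mp hcontra
    omega

-- ===== VERDICT (by name: the statement is the Claim_ definition above) =====
theorem regset_spec : Claim_equal_regset := by
  intro regs ref _
  unfold Spec_regset
  exact regset_eq regs ref
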